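-- pv_equiv track=rewrite | github.com/rukshar69/ProjectEuler100 | prb51.py | genNumber
-- ===== SOURCE A (Python) =====
-- def genNumber(repeatingDig, tempPattern):
--     sz = len(tempPattern)
--     n = 0
--     for i in range(sz):
--         n *=10
--         if tempPattern[i] ==-1: n += repeatingDig
--         else: n += tempPattern[i]
--     return n
-- ===== SOURCE B (Python) =====
-- def genNumber(repeatingDig, tempPattern):
--     digits = [repeatingDig if d == -1 else d for d in tempPattern]
--     total, weight = 0, 1
--     for d in reversed(digits):
--         total += d * weight
--         weight *= 10
--     return total
-- ===== Notes on version B (the rewrite author's own statement) =====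
-- stated objective: alternative
-- what changed: Replaces A's Horner accumulation (n = n*10 + digit, front to back) by first resolving the pattern into concrete digits and then summing digit*place-value back-to-front with a running weight accumulator, never multiplying the running total.
import Mathlib
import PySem

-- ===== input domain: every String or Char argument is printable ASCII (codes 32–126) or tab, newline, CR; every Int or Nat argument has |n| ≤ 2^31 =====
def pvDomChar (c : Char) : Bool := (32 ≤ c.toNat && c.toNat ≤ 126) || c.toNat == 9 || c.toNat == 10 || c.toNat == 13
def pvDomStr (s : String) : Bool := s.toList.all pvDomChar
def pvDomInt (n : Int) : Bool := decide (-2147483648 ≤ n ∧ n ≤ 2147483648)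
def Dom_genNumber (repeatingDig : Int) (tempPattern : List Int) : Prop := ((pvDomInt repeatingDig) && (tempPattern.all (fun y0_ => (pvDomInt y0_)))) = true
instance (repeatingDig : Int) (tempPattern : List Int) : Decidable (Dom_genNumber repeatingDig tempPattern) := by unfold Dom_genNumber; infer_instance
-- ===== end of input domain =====

-- B resolves the pattern into concrete digits, then sums digit*place-value back-to-front
-- with a running weight accumulator, instead of A's Horner accumulation n = n*10 + digit;
-- objective: alternative (same cost).

-- ===== PORT A =====
def genNumber (repeatingDig : Int) (tempPattern : List Int) : Int :=
  let sz : Int := tempPattern.length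
  (PySem.List.pyRange 0 sz 1).foldl
    (fun n i =>
      let n := n * 10
      if PySem.List.pyGetD tempPattern i 0 = -1 then n + repeatingDig
      else n + PySem.List.pyGetD tempPattern i 0) 0

-- ===== PORT B =====
def genNumber_alt (repeatingDig : Int) (tempPattern : List Int) : Int :=
  let digits := tempPattern.map (fun d => if d = -1 then repeatingDig else d)
  (digits.reverse.foldl (fun (sw : Int × Int) d => (sw.1 + d * sw.2, sw.2 * 10)) (0, 1)).1

-- ===== PRECONDITION & SPEC =====
def Spec_genNumber (repeatingDig : Int) (tempPattern : List Int) (out : Int) : Prop := out = genNumber_alt repeatingDig tempPattern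
instance (repeatingDig : Int) (tempPattern : List Int) (out : Int) : Decidable (Spec_genNumber repeatingDig tempPattern out) := by unfold Spec_genNumber; infer_instance

-- ===== CLAIM (what is proved, stated in full; the proofs are below) =====
def Claim_equal_genNumber : Prop := ∀ (repeatingDig : Int) (tempPattern : List Int), Dom_genNumber repeatingDig tempPattern → Spec_genNumber repeatingDig tempPattern (genNumber repeatingDig tempPattern)

-- ===== LEMMAS AND PROOFS =====

-- reference value: digits by place value, defined structurally
def pvVal : List Int → Int
  | [] => 0
  | x :: xs => x * 10 ^ xs.length + pvVal xs

theorem pvHorner (r : Int) (l : List Int) (n : Int) :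
    l.foldl (fun n x => if x = -1 then n * 10 + r else n * 10 + x) n
      = n * 10 ^ l.length + pvVal (l.map (fun d => if d = -1 then r else d)) := by
  induction l generalizing n with
  | nil => simp [pvVal]
  | cons x xs ih =>
    simp only [List.foldl_cons, ih, List.map_cons, pvVal, List.length_cons,
      List.length_map]
    by_cases h : x = -1 <;> simp [h, pow_succ] <;> ring

theorem pvRevSum (l : List Int) :
    l.foldr (fun d (sw : Int × Int) => (sw.1 + d * sw.2, sw.2 * 10)) (0, 1)
      = (pvVal l, 10 ^ l.length) := by
  induction l with
  | nil => simp [pvVal]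
  | cons x xs ih =>
    simp only [List.foldr_cons, ih, pvVal, List.length_cons, pow_succ]
    exact Prod.ext (by ring) rfl

theorem pvA_foldl (r : Int) (p : List Int) :
    genNumber r p = p.foldl (fun n x => if x = -1 then n * 10 + r else n * 10 + x) 0 := by
  unfold genNumber
  have := PySem.List.foldl_pyRange_pyGetD (xs := p) (a := 0)
    (f := fun (n x : Int) => if x = -1 then n * 10 + r else n * 10 + x) (d := 0)
    (init := (0 : Int)) (by omega)
  simpa using this

-- ===== VERDICT (by name: the statement is the Claim_ definition above) =====
theorem genNumber_spec : Claim_equal_genNumber := by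
  unfold Claim_equal_genNumber
  intro r p _
  unfold Spec_genNumber genNumber_alt
  rw [pvA_foldl, pvHorner]
  show _ = (List.foldl (fun (sw : Int × Int) d => (sw.1 + d * sw.2, sw.2 * 10)) (0, 1)
    ((p.map (fun d => if d = -1 then r else d)).reverse)).1
  rw [List.foldl_reverse]
  rw [show (fun (x : Int) (sw : Int × Int) => (fun (sw : Int × Int) d => (sw.1 + d * sw.2, sw.2 * 10)) sw x)
        = (fun d (sw : Int × Int) => (sw.1 + d * sw.2, sw.2 * 10)) from rfl]
  rw [pvRevSum]
  simp
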